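-- pv_equiv track=rewrite | github.com/hbzw201633420/RCE_HawkEye | rce_hawkeye/tamper/__init__.py | overlongutf8
-- ===== SOURCE A (Python) =====
-- def overlongutf8(payload: str, **kwargs) -> str:
--     """超长UTF-8编码"""
--     result = ""
--     for char in payload:
--         if char.isascii() and char.isalnum():
--             result += char
--         else:
--             code = ord(char)
--             if code < 128:
--                 result += f"%c0%{code:02x}"
--             else:
--                 result += char
--     return result
-- ===== SOURCE B (Python) =====
-- def overlongutf8(payload: str, **kwargs) -> str:
--     """超长UTF-8编码"""
--     out = []
--     i, n = 0, len(payload)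
--     while i < n:
--         # scan the maximal run of kept (ASCII alphanumeric) characters
--         j = i
--         while j < n and payload[j].isascii() and payload[j].isalnum():
--             j += 1
--         out.append(payload[i:j])          # copy the whole run as one slice
--         if j < n:
--             c = ord(payload[j])
--             out.append("%%c0%%%02x" % c if c < 128 else payload[j])
--             j += 1
--         i = j
--     return "".join(out)
-- ===== Notes on version B (the rewrite author's own statement) =====
-- stated objective: alternative
-- what changed: Replaces A's per-character branch-and-concatenate loop by a two-pointer run scanner: an inner scan finds each maximal run of kept ASCII-alphanumeric characters, the run is copied as one slice, the single following character is encoded, and the collected pieces are joined once at the end.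
import Mathlib
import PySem

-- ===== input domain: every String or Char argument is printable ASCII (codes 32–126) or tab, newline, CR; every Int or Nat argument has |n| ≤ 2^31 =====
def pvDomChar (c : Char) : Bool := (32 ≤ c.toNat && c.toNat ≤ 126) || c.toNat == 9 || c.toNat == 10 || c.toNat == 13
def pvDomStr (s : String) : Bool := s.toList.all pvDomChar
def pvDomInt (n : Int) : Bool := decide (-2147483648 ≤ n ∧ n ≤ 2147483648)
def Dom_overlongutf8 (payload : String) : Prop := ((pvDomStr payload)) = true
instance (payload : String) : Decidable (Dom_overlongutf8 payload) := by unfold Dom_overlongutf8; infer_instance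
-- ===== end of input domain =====

-- B replaces A's per-character branch-and-concatenate loop by a two-pointer run scanner
-- (maximal kept runs copied as slices, one encoded char between runs, one final join);
-- objective: alternative structure, same value everywhere.

-- f"{code:02x}" / "%02x" % code for 0 ≤ code < 128: two lowercase hex digits (hand-ported, exact on this range)
def pvHex2 (n : Nat) : String :=
  let dig : Nat → Char := fun d => if d < 10 then Char.ofNat (48 + d) else Char.ofNat (87 + d)
  String.ofList [dig (n / 16), dig (n % 16)]

-- ===== PORT A =====
-- char.isascii() = ord(char) < 128; char.isalnum() on ASCII = PySem.Chars.isalnum (exact here)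
def overlongutf8 (payload : String) : String :=
  payload.toList.foldl
    (fun result char =>
      if char.toNat < 128 && PySem.Chars.isalnum char then
        result ++ String.ofList [char]
      else
        let code := char.toNat
        if code < 128 then result ++ "%c0%" ++ pvHex2 code
        else result ++ String.ofList [char]) ""

-- ===== PORT B =====
-- kept character test: payload[j].isascii() and payload[j].isalnum()
def pvKeep (c : Char) : Bool := c.toNat < 128 && PySem.Chars.isalnum c

-- the inner while loop: advance j while j < n and the char at j is kept
def pvInner (s : List Char) (j : Nat) : Nat :=
  if h : j < s.length then
    if pvKeep s[j] then pvInner s (j + 1) else j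
  else j
termination_by s.length - j

theorem pvInner_ge (s : List Char) (j : Nat) : j ≤ pvInner s j := by
  unfold pvInner
  split
  · split
    · exact le_trans (Nat.le_succ j) (pvInner_ge s (j + 1))
    · exact le_refl j
  · exact le_refl j
termination_by s.length - j

-- the outer while loop, collecting the pieces of `out` (payload[i:j] is (s.drop i).take (j-i))
def pvOuter (s : List Char) (i : Nat) : List String :=
  if _h : i < s.length then
    if h2 : pvInner s i < s.length then
      String.ofList ((s.drop i).take (pvInner s i - i)) ::
        (if (s[pvInner s i]'h2).toNat < 128 then "%c0%" ++ pvHex2 (s[pvInner s i]'h2).toNat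
         else String.ofList [s[pvInner s i]'h2]) ::
        pvOuter s (pvInner s i + 1)
    else [String.ofList ((s.drop i).take (pvInner s i - i))]
  else []
termination_by s.length - i
decreasing_by
  have := pvInner_ge s i; omega

-- "".join(out)
def overlongutf8_alt (payload : String) : String :=
  String.join (pvOuter payload.toList 0)

-- ===== PRECONDITION & SPEC =====
def Spec_overlongutf8 (payload : String) (out : String) : Prop := out = overlongutf8_alt payload
instance (payload : String) (out : String) : Decidable (Spec_overlongutf8 payload out) := by unfold Spec_overlongutf8; infer_instance

-- ===== CLAIM (what is proved, stated in full; the proofs are below) =====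
def Claim_equal_overlongutf8 : Prop := ∀ (payload : String), Dom_overlongutf8 payload → Spec_overlongutf8 payload (overlongutf8 payload)

-- ===== LEMMAS AND PROOFS =====

-- per-character encoding both programs realize
def pvEnc (c : Char) : String :=
  if c.toNat < 128 && PySem.Chars.isalnum c then String.ofList [c]
  else if c.toNat < 128 then "%c0%" ++ pvHex2 c.toNat else String.ofList [c]

theorem pvJoinShift (l : List String) (a : String) :
    l.foldl (fun r s => r ++ s) a = a ++ l.foldl (fun r s => r ++ s) "" := by
  induction l generalizing a with
  | nil => simp
  | cons x t ih =>
    simp only [List.foldl_cons]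
    rw [ih (a ++ x), ih ("" ++ x)]
    simp [String.append_assoc]

theorem pvJoinCons (x : String) (L : List String) :
    String.join (x :: L) = x ++ String.join L := by
  simp only [String.join, List.foldl_cons]
  rw [pvJoinShift]
  simp

-- A's fold equals the canonical map-then-join form
theorem foldA_eq (l : List Char) (acc : String) :
    l.foldl
      (fun result char =>
        if char.toNat < 128 && PySem.Chars.isalnum char then
          result ++ String.ofList [char]
        else
          let code := char.toNat
          if code < 128 then result ++ "%c0%" ++ pvHex2 code
          else result ++ String.ofList [char]) acc
    = acc ++ String.join (l.map pvEnc) := by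
  induction l generalizing acc with
  | nil => simp [String.join]
  | cons c t ih =>
    simp only [List.foldl_cons, List.map_cons, pvJoinCons]
    rw [ih]
    simp only [pvEnc]
    split_ifs <;> simp_all [String.append_assoc]

theorem pvInner_le (s : List Char) (j : Nat) (hj : j ≤ s.length) : pvInner s j ≤ s.length := by
  unfold pvInner
  split
  · split
    · rename_i hlt _
      exact pvInner_le s (j + 1) (by omega)
    · omega
  · omega
termination_by s.length - j

theorem pvInner_stop (s : List Char) (j : Nat) (c : Char)
    (h : s[pvInner s j]? = some c) : pvKeep c = false := by
  by_cases hj : j < s.length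
  · by_cases hk : pvKeep (s[j]'hj) = true
    · have heq : pvInner s j = pvInner s (j + 1) := by
        rw [pvInner]; simp [hj, hk]
      rw [heq] at h
      exact pvInner_stop s (j + 1) c h
    · have heq : pvInner s j = j := by
        rw [pvInner]; simp [hj, hk]
      rw [heq, List.getElem?_eq_getElem hj] at h
      cases h
      simpa using hk
  · have heq : pvInner s j = j := by
      rw [pvInner]; simp [hj]
    rw [heq, List.getElem?_eq_none (by omega)] at h
    cases h
termination_by s.length - j

-- the run extracted by pvInner, glued back onto the rest
theorem pvInner_join (s : List Char) (i : Nat) :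
    String.ofList ((s.drop i).take (pvInner s i - i)) ++ String.join ((s.drop (pvInner s i)).map pvEnc)
      = String.join ((s.drop i).map pvEnc) := by
  unfold pvInner
  split
  · rename_i hi
    split
    · rename_i hk
      have ih := pvInner_join s (i + 1)
      have hge := pvInner_ge s (i + 1)
      have hdrop : s.drop i = s[i] :: s.drop (i + 1) := List.drop_eq_getElem_cons hi
      rw [hdrop]
      have htake : (s[i] :: s.drop (i + 1)).take (pvInner s (i + 1) - i)
          = s[i] :: (s.drop (i + 1)).take (pvInner s (i + 1) - (i + 1)) := by
        have h1 : pvInner s (i + 1) - i = (pvInner s (i + 1) - (i + 1)) + 1 := by omega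
        rw [h1, List.take_succ_cons]
      rw [htake]
      simp only [List.map_cons, pvJoinCons]
      have hmk : String.ofList (s[i] :: (s.drop (i + 1)).take (pvInner s (i + 1) - (i + 1)))
          = String.ofList [s[i]] ++ String.ofList ((s.drop (i + 1)).take (pvInner s (i + 1) - (i + 1))) := by
        rw [← String.ofList_append]; rfl
      rw [hmk, String.append_assoc, ih]
      have henc : pvEnc s[i] = String.ofList [s[i]] := by
        simp only [pvKeep] at hk
        simp [pvEnc, hk]
      rw [henc]
    · simp [String.ofList_nil]
  · simp [String.ofList_nil]
termination_by s.length - i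

-- B's outer loop, joined, equals the canonical map-then-join form of the suffix
theorem pvOuter_join (s : List Char) (i : Nat) :
    String.join (pvOuter s i) = String.join ((s.drop i).map pvEnc) := by
  unfold pvOuter
  split
  · rename_i hi
    split
    · rename_i h2
      have hge := pvInner_ge s i
      have ih := pvOuter_join s (pvInner s i + 1)
      simp only [pvJoinCons]
      rw [ih]
      have hstop : pvKeep (s[pvInner s i]'h2) = false :=
        pvInner_stop s i _ (List.getElem?_eq_getElem h2)
      have hdrop : s.drop (pvInner s i) = (s[pvInner s i]'h2) :: s.drop (pvInner s i + 1) :=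
        List.drop_eq_getElem_cons h2
      have henc : (if (s[pvInner s i]'h2).toNat < 128 then "%c0%" ++ pvHex2 (s[pvInner s i]'h2).toNat
            else String.ofList [s[pvInner s i]'h2]) = pvEnc (s[pvInner s i]'h2) := by
        simp only [pvKeep] at hstop
        simp [pvEnc, hstop]
      rw [henc, ← String.append_assoc]
      calc String.ofList ((s.drop i).take (pvInner s i - i)) ++ pvEnc (s[pvInner s i]'h2)
              ++ String.join ((s.drop (pvInner s i + 1)).map pvEnc)
          = String.ofList ((s.drop i).take (pvInner s i - i))
              ++ String.join ((s.drop (pvInner s i)).map pvEnc) := by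
            rw [hdrop]; simp only [List.map_cons, pvJoinCons, String.append_assoc]
        _ = _ := pvInner_join s i
    · rename_i h2
      have hle := pvInner_le s i (by omega)
      have hnil2 : s.drop (pvInner s i) = [] := List.drop_eq_nil_of_le (by omega)
      have hglue := pvInner_join s i
      rw [hnil2] at hglue
      simp only [List.map_nil] at hglue
      simpa [String.join] using hglue
  · rename_i hi
    have hnil : s.drop i = [] := List.drop_eq_nil_of_le (by omega)
    simp [hnil, String.join]
termination_by s.length - i
decreasing_by
  have := pvInner_ge s i; omega

-- ===== VERDICT (by name: the statement is the Claim_ definition above) =====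
theorem overlongutf8_spec : Claim_equal_overlongutf8 := by
  intro payload _
  unfold Spec_overlongutf8 overlongutf8 overlongutf8_alt
  rw [foldA_eq, pvOuter_join]
  simp
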